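-- pv_equiv track=rewrite | github.com/EmmanuelSnr1/Comp-Intelligence | Hybrid_aco_w_local_search.py | calculate_waste
-- ===== SOURCE A (Python) =====
-- stock_lengths = [120, 115, 110, 105, 100]
--
-- piece_lengths = [21, 22, 24, 25, 27, 29, 30, 31, 32, 33, 34, 35, 38, 39, 42, 44, 45, 46, 47, 48, 49, 50, 51, 52, 53, 54, 55, 56, 57, 59, 60, 61, 63, 65, 66, 67]
--
-- def calculate_waste(solution):
--     total_waste = 0
--     for stock_index, activities in solution:
--         for activity in activities:
--             used_length = sum(piece_lengths[piece_index] for piece_index in activity)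
--             waste_per_piece = stock_lengths[stock_index] - used_length
--             total_waste += waste_per_piece
--     return total_waste
-- ===== SOURCE B (Python) =====
-- stock_lengths = [120, 115, 110, 105, 100]
--
-- piece_lengths = [21, 22, 24, 25, 27, 29, 30, 31, 32, 33, 34, 35, 38, 39, 42, 44, 45, 46, 47, 48, 49, 50, 51, 52, 53, 54, 55, 56, 57, 59, 60, 61, 63, 65, 66, 67]
--
-- def calculate_waste(solution):
--     # Tally multiplicities first, then index each length table once per
--     # DISTINCT index, weighting by the tally.
--     stock_tally = {}
--     piece_tally = {}
--     for stock_index, activities in solution: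
--         for activity in activities:
--             stock_tally[stock_index] = stock_tally.get(stock_index, 0) + 1
--             for piece_index in activity:
--                 piece_tally[piece_index] = piece_tally.get(piece_index, 0) + 1
--     waste = 0
--     for s, c in stock_tally.items():
--         waste += stock_lengths[s] * c
--     for p, c in piece_tally.items():
--         waste -= piece_lengths[p] * c
--     return waste
-- ===== Notes on version B (the rewrite author's own statement) =====
-- stated objective: alternative
-- what changed: B never forms a per-activity waste: it first builds two multiplicity dictionaries (how many activities use each stock index, how many times each piece index occurs), then computes the waste as weighted sums over the DISTINCT indices, indexing each length table once per distinct index instead of once per occurrence.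
import Mathlib
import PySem

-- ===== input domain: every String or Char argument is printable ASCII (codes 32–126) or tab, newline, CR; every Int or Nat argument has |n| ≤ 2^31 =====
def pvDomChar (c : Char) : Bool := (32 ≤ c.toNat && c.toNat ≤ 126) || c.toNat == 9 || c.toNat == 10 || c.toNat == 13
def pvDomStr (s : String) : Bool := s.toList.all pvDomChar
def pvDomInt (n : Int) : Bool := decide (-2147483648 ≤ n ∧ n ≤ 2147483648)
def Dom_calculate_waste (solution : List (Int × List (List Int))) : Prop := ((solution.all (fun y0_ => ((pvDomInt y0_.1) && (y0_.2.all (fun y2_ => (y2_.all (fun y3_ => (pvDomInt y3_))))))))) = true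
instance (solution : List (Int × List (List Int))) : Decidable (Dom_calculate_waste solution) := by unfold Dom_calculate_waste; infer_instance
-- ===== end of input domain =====

-- B replaces A's per-activity subtraction with two multiplicity dictionaries
-- (tallies of stock/piece indices) and weighted sums over the distinct indices;
-- objective: alternative (same asymptotic cost, different data structure).
-- Module constants shared by both programs:
def stock_lengths : List Int := [120, 115, 110, 105, 100]
def piece_lengths : List Int :=
  [21, 22, 24, 25, 27, 29, 30, 31, 32, 33, 34, 35, 38, 39, 42, 44, 45, 46, 47, 48,
   49, 50, 51, 52, 53, 54, 55, 56, 57, 59, 60, 61, 63, 65, 66, 67]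

-- ===== PORT A =====
-- A: nested loops, per-activity waste = stock - sum of pieces, accumulated.
-- Indexing is total only under Pre_ (InRange); pyGetD is exact there.
def calculate_waste (solution : List (Int × List (List Int))) : Int :=
  solution.foldl (fun total_waste p =>
    p.2.foldl (fun total_waste activity =>
      let used_length := activity.foldl
        (fun s piece_index => s + PySem.List.pyGetD piece_lengths piece_index 0) 0
      total_waste + (PySem.List.pyGetD stock_lengths p.1 0 - used_length)) total_waste) 0

-- ===== PORT B =====
-- B: build the two tally dicts in one nested pass, then two item loops.
def calculate_waste_alt (solution : List (Int × List (List Int))) : Int :=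
  let tallies := solution.foldl
    (fun (t : PySem.Dict Int Int × PySem.Dict Int Int) p =>
      p.2.foldl (fun t activity =>
        (t.1.insert p.1 (t.1.getD p.1 0 + 1),
         activity.foldl (fun d i => d.insert i (d.getD i 0 + 1)) t.2)) t)
    (PySem.Dict.empty, PySem.Dict.empty)
  let waste := tallies.1.items.foldl
    (fun w q => w + PySem.List.pyGetD stock_lengths q.1 0 * q.2) 0
  tallies.2.items.foldl
    (fun w q => w - PySem.List.pyGetD piece_lengths q.1 0 * q.2) waste

-- ===== PRECONDITION & SPEC =====
-- Pre_: every piece index is a valid Python index, and every stock index whose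
-- activity list is nonempty (i.e. is actually read) is too; A raises IndexError
-- otherwise, and so does B.
def Pre_calculate_waste (solution : List (Int × List (List Int))) : Prop :=
  ∀ p ∈ solution, (p.2 ≠ [] → PySem.Raise.InRange 5 p.1) ∧
    ∀ act ∈ p.2, ∀ i ∈ act, PySem.Raise.InRange 36 i
instance (solution : List (Int × List (List Int))) : Decidable (Pre_calculate_waste solution) := by
  unfold Pre_calculate_waste; infer_instance
def pvWitness_calculate_waste : (List (Int × List (List Int))) := [(0, [[0, 2], []]), (4, [[-1]])]

def Spec_calculate_waste (solution : List (Int × List (List Int))) (out : Int) : Prop := out = calculate_waste_alt solution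
instance (solution : List (Int × List (List Int))) (out : Int) : Decidable (Spec_calculate_waste solution out) := by unfold Spec_calculate_waste; infer_instance

-- ===== CLAIM (what is proved, stated in full; the proofs are below) =====
def Claim_equal_calculate_waste : Prop := ∀ (solution : List (Int × List (List Int))), Dom_calculate_waste solution → Pre_calculate_waste solution → Spec_calculate_waste solution (calculate_waste solution)

-- ===== LEMMAS AND PROOFS =====

-- the flat streams of stock indices (one per activity) and of piece indices
def sStream (solution : List (Int × List (List Int))) : List Int :=
  solution.flatMap (fun p => p.2.map (fun _ => p.1))
def pStream (solution : List (Int × List (List Int))) : List Int :=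
  solution.flatMap (fun p => p.2.flatMap (fun a => a))

-- B's nested tally pass is the counter of each flat stream
theorem inner_tally (s : Int) (acts : List (List Int))
    (d1 d2 : PySem.Dict Int Int) :
    acts.foldl (fun t activity =>
        (t.1.insert s (t.1.getD s 0 + 1),
         activity.foldl (fun d i => d.insert i (d.getD i 0 + 1)) t.2)) (d1, d2)
    = ((acts.map (fun _ => s)).foldl (fun d i => d.insert i (d.getD i 0 + 1)) d1,
       (acts.flatMap (fun a => a)).foldl (fun d i => d.insert i (d.getD i 0 + 1)) d2) := by
  induction acts generalizing d1 d2 with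
  | nil => simp
  | cons a as ih =>
    simp only [List.foldl_cons, List.map_cons, List.flatMap_cons, List.foldl_append]
    exact ih _ _

theorem outer_tally (solution : List (Int × List (List Int)))
    (d1 d2 : PySem.Dict Int Int) :
    solution.foldl (fun (t : PySem.Dict Int Int × PySem.Dict Int Int) p =>
        p.2.foldl (fun t activity =>
          (t.1.insert p.1 (t.1.getD p.1 0 + 1),
           activity.foldl (fun d i => d.insert i (d.getD i 0 + 1)) t.2)) t) (d1, d2)
    = ((sStream solution).foldl (fun d i => d.insert i (d.getD i 0 + 1)) d1,
       (pStream solution).foldl (fun d i => d.insert i (d.getD i 0 + 1)) d2) := by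
  induction solution generalizing d1 d2 with
  | nil => simp [sStream, pStream]
  | cons p ps ih =>
    simp only [List.foldl_cons, sStream, pStream, List.flatMap_cons, List.foldl_append]
    rw [inner_tally, ih]
    simp [sStream, pStream]

-- summing an ite over a nodup list containing x
theorem sum_map_ite_mem (l : List Int) (x : Int) (c : Int)
    (hnd : l.Nodup) (hx : x ∈ l) :
    (l.map (fun k => if k = x then c else 0)).sum = c := by
  induction l with
  | nil => cases hx
  | cons y ys ih =>
    obtain ⟨hny, hnd'⟩ := List.nodup_cons.mp hnd
    simp only [List.map_cons, List.sum_cons]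
    rcases List.mem_cons.mp hx with h | h
    · have hz : ∀ k ∈ ys, (if k = x then c else (0:Int)) = 0 := by
        intro k hk
        have hkx : k ≠ x := fun e => hny (by rw [← h, ← e]; exact hk)
        simp [hkx]
      rw [List.map_congr_left hz]
      simp [← h]
    · have hyx : y ≠ x := fun e => hny (by rw [e]; exact h)
      rw [ih hnd' h]
      simp [hyx]

-- weighted sum over a counter's items = plain sum over the stream
theorem weighted_counter (f : Int → Int) (xs : List Int) :
    ((PySem.Dict.counter xs).items.map (fun q => f q.1 * q.2)).sum
      = (xs.map f).sum := by
  induction xs using List.reverseRecOn with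
  | nil => rfl
  | append_singleton xs x ih =>
    rw [PySem.Dict.items_counter] at ih ⊢
    simp only [List.map_map, Function.comp_def] at ih ⊢
    rw [PySem.Set.ofList_append_singleton]
    by_cases hx : x ∈ xs
    · rw [PySem.Set.add_of_mem ((PySem.Set.mem_ofList xs x).mpr hx)]
      have hcong : ∀ k ∈ PySem.Set.ofList xs,
          f k * (((xs ++ [x]).count k : Nat) : Int)
            = f k * ((xs.count k : Nat) : Int) + (if k = x then f x else 0) := by
        intro k _
        by_cases h : k = x
        · subst h; simp [List.count_append]; ring
        · have hxk : (x == k) = false := by simp [Ne.symm h]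
          simp [List.count_append, List.count_singleton, hxk]
          exact fun e => absurd e h
      rw [List.map_congr_left hcong, List.sum_map_add, ih,
          sum_map_ite_mem _ x _ (PySem.Set.nodup_ofList xs)
            ((PySem.Set.mem_ofList xs x).mpr hx)]
      simp
    · rw [PySem.Set.add_of_not_mem (fun hc => hx ((PySem.Set.mem_ofList xs x).mp hc))]
      simp only [List.map_append, List.sum_append, List.map_cons, List.map_nil,
        List.sum_cons, List.sum_nil]
      have hcong : ∀ k ∈ PySem.Set.ofList xs,
          f k * (((xs ++ [x]).count k : Nat) : Int) = f k * ((xs.count k : Nat) : Int) := by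
        intro k hk
        have hne : k ≠ x := fun e => hx (e ▸ (PySem.Set.mem_ofList xs k).mp hk)
        have hxk : (x == k) = false := by simp [Ne.symm hne]
        simp [List.count_append, List.count_singleton, hxk]
      rw [List.map_congr_left hcong, ih]
      have hc1 : (xs ++ [x]).count x = xs.count x + 1 := by
        simp [List.count_append]
      rw [hc1, List.count_eq_zero_of_not_mem hx]
      simp

-- subtracting fold = init - sum
theorem foldl_sub (l : List (Int × Int)) (g : Int × Int → Int) (init : Int) :
    l.foldl (fun w q => w - g q) init = init - (l.map g).sum := by
  induction l generalizing init with
  | nil => simp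
  | cons q qs ih => simp only [List.foldl_cons, List.map_cons, List.sum_cons]; rw [ih]; omega

-- A's nested accumulation, flattened to the two stream sums
theorem a_flat (solution : List (Int × List (List Int))) :
    calculate_waste solution
      = ((sStream solution).map (fun s => PySem.List.pyGetD stock_lengths s 0)).sum
        - ((pStream solution).map (fun i => PySem.List.pyGetD piece_lengths i 0)).sum := by
  unfold calculate_waste
  induction solution using List.reverseRecOn with
  | nil => simp [sStream, pStream]
  | append_singleton ps p ih =>
    rw [List.foldl_append, List.foldl_cons, List.foldl_nil, ih]
    simp only [sStream, pStream, List.flatMap_append, List.flatMap_cons, List.flatMap_nil,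
      List.append_nil, List.map_append, List.sum_append]
    have inner : ∀ (acts : List (List Int)) (w : Int),
        acts.foldl (fun total_waste activity =>
          total_waste + (PySem.List.pyGetD stock_lengths p.1 0 -
            activity.foldl (fun s i => s + PySem.List.pyGetD piece_lengths i 0) 0)) w
        = w + ((acts.map (fun _ => p.1)).map (fun s => PySem.List.pyGetD stock_lengths s 0)).sum
            - ((acts.flatMap (fun a => a)).map (fun i => PySem.List.pyGetD piece_lengths i 0)).sum := by
      intro acts
      induction acts with
      | nil => intro w; simp
      | cons a as ih2 =>
        intro w
        simp only [List.foldl_cons, List.map_cons, List.sum_cons, List.flatMap_cons,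
          List.map_append, List.sum_append]
        rw [ih2]
        rw [PySem.List.foldl_add a (fun i => PySem.List.pyGetD piece_lengths i 0) 0]
        omega
    rw [inner]
    omega

theorem main_eq (solution : List (Int × List (List Int))) :
    calculate_waste solution = calculate_waste_alt solution := by
  unfold calculate_waste_alt
  simp only [outer_tally, PySem.Dict.foldl_insert_getD_add_one_eq_counter]
  rw [PySem.List.foldl_add (PySem.Dict.counter (sStream solution)).items (fun q : Int × Int => PySem.List.pyGetD stock_lengths q.1 0 * q.2) 0]
  rw [foldl_sub]
  rw [weighted_counter (fun s => PySem.List.pyGetD stock_lengths s 0) (sStream solution)]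
  rw [weighted_counter (fun i => PySem.List.pyGetD piece_lengths i 0) (pStream solution)]
  rw [a_flat]
  omega

-- ===== VERDICT (by name: the statement is the Claim_ definition above) =====
theorem calculate_waste_spec : Claim_equal_calculate_waste := by
  intro solution _ _
  exact main_eq solution
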